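-- pv_equiv track=rewrite | github.com/jfvitas/ProteoSphereV2 | datasets/multimodal/adapter.py | _requested_modalities_with_refs
-- ===== SOURCE A (Python) =====
-- from collections.abc import Iterable, Mapping
--
-- def _requested_modalities_with_refs(
--     requested_modalities: tuple[str, ...],
--     modality_refs: Mapping[str, tuple[str, ...]],
-- ) -> tuple[str, ...]:
--     available: list[str] = []
--     resolved_lookup = {modality.casefold(): modality for modality in modality_refs}
--     for requested_modality in requested_modalities:
--         if requested_modality.casefold() in resolved_lookup:
--             available.append(requested_modality)
--     return tuple(available)
-- ===== SOURCE B (Python) =====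
-- def _requested_modalities_with_refs(requested_modalities, modality_refs):
--     # Different algorithm: build the sorted list of distinct casefolded keys once,
--     # then decide each request by binary search instead of a hash lookup.
--     keys = sorted({k.casefold() for k in modality_refs})
--
--     def found(x):
--         lo, hi = 0, len(keys)
--         while lo < hi:
--             mid = (lo + hi) // 2
--             if keys[mid] < x:
--                 lo = mid + 1
--             else:
--                 hi = mid
--         return lo < len(keys) and keys[lo] == x
--
--     return tuple(m for m in requested_modalities if found(m.casefold()))
-- ===== Notes on version B (the rewrite author's own statement) =====
-- stated objective: alternative
-- what changed: Replaced A's casefolded hash-index (dict comprehension + O(1) membership per request) by a sorted deduplicated list of casefolded keys queried with a hand-written binary search per requested modality.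
import Mathlib
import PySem

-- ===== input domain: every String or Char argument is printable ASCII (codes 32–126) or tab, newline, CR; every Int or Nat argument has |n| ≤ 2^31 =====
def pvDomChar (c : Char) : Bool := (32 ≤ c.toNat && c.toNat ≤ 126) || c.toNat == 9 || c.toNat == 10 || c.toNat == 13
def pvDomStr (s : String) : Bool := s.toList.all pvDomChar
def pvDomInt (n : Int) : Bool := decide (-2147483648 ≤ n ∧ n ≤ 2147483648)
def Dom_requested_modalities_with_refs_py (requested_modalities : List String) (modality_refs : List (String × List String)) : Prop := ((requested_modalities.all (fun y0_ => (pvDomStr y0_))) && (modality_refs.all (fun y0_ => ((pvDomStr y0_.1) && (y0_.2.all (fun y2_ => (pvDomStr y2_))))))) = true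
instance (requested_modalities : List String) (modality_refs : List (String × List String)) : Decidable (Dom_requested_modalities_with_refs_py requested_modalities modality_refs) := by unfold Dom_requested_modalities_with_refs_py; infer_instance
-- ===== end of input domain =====

-- B drops A's casefolded hash index: it sorts the deduplicated casefolded keys once
-- and decides each requested modality by binary search (alternative algorithm).


-- ===== PORT A =====
-- str.casefold is ported as PySem.Str.lower: exact on the ASCII strings of Dom_.
def requested_modalities_with_refs_py (requested_modalities : List String) (modality_refs : List (String × List String)) : List String :=
  let resolved_lookup : PySem.Dict String String :=
    modality_refs.foldl (fun d p => d.insert (PySem.Str.lower p.1) p.1) PySem.Dict.empty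
  requested_modalities.foldl
    (fun available r => if resolved_lookup.contains (PySem.Str.lower r) then available ++ [r] else available) []

-- ===== PORT B =====
-- Source B's hand-written binary-search loop `while lo < hi: …`, transcribed as the
-- obvious recursion on the same state. lo/hi are nonnegative Python ints bounded by
-- len(keys), so they are ported as Nat and `(lo + hi) // 2` is Nat division (exact
-- here: both operands are nonnegative). `keys[mid]` is in range (lo ≤ mid < hi ≤
-- len keys holds at every call), so the getD default is never read.
def pvBsearch (keys : List String) (x : String) (lo hi : Nat) : Nat :=
  if lo < hi then
    let mid := (lo + hi) / 2
    if keys.getD mid "" < x then pvBsearch keys x (mid + 1) hi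
    else pvBsearch keys x lo mid
  else lo
termination_by hi - lo
decreasing_by all_goals omega

-- Source B's `found(x)`: run the loop from (0, len(keys)), then `lo < len(keys) and keys[lo] == x`.
def pvFound (keys : List String) (x : String) : Bool :=
  let lo := pvBsearch keys x 0 keys.length
  decide (lo < keys.length) && (keys.getD lo "" == x)

-- Source B: keys = sorted({k.casefold() for k in modality_refs}); then an order-preserving
-- comprehension filtered by found(m.casefold()).
def requested_modalities_with_refs_py_alt (requested_modalities : List String) (modality_refs : List (String × List String)) : List String :=
  let keys := PySem.List.sorted (PySem.Set.ofList (modality_refs.map (fun p => PySem.Str.lower p.1))) (fun s => s)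
  requested_modalities.filter (fun m => pvFound keys (PySem.Str.lower m))

-- ===== PRECONDITION & SPEC =====
def Spec_requested_modalities_with_refs_py (requested_modalities : List String) (modality_refs : List (String × List String)) (out : List String) : Prop := out = requested_modalities_with_refs_py_alt requested_modalities modality_refs
instance (requested_modalities : List String) (modality_refs : List (String × List String)) (out : List String) : Decidable (Spec_requested_modalities_with_refs_py requested_modalities modality_refs out) := by unfold Spec_requested_modalities_with_refs_py; infer_instance

-- ===== CLAIM (what is proved, stated in full; the proofs are below) =====
def Claim_equal_requested_modalities_with_refs_py : Prop := ∀ (requested_modalities : List String) (modality_refs : List (String × List String)), Dom_requested_modalities_with_refs_py requested_modalities modality_refs → Spec_requested_modalities_with_refs_py requested_modalities modality_refs (requested_modalities_with_refs_py requested_modalities modality_refs)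

-- ===== LEMMAS AND PROOFS =====

-- Loop invariant of the binary search: on a ≤-sorted list, starting from a window
-- whose outside already satisfies the two bounds, the final lo separates the keys
-- strictly below x from those ≥ x.
theorem pvBsearch_spec (keys : List String) (x : String)
    (hs : keys.Pairwise (· ≤ ·)) :
    ∀ (n lo hi : Nat), hi - lo = n → lo ≤ hi → hi ≤ keys.length →
    (∀ j (hj : j < keys.length), j < lo → keys[j] < x) →
    (∀ j (hj : j < keys.length), hi ≤ j → x ≤ keys[j]) →
    pvBsearch keys x lo hi ≤ keys.length ∧
    (∀ j (hj : j < keys.length), j < pvBsearch keys x lo hi → keys[j] < x) ∧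
    (∀ j (hj : j < keys.length), pvBsearch keys x lo hi ≤ j → x ≤ keys[j]) := by
  intro n
  induction n using Nat.strong_induction_on with
  | _ n ih =>
    intro lo hi hn hle hlen hlow hhigh
    rw [pvBsearch]
    by_cases h : lo < hi
    · simp only [h, if_true]
      have hmidlt : (lo + hi) / 2 < hi := by omega
      have hmidge : lo ≤ (lo + hi) / 2 := by omega
      have hmlen : (lo + hi) / 2 < keys.length := by omega
      rw [List.getD_eq_getElem keys "" hmlen]
      by_cases hcmp : keys[(lo + hi) / 2] < x
      · simp only [hcmp, if_true]
        exact ih (hi - ((lo + hi) / 2 + 1)) (by omega) ((lo + hi) / 2 + 1) hi rfl (by omega) hlen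
          (fun j hj hjlt => by
            rcases Nat.lt_or_ge j ((lo + hi) / 2) with hj' | hj'
            · exact lt_of_le_of_lt (List.pairwise_iff_getElem.mp hs j ((lo + hi) / 2) hj hmlen hj') hcmp
            · have : j = (lo + hi) / 2 := by omega
              exact this ▸ hcmp)
          hhigh
      · simp only [hcmp, if_false]
        have hxle : x ≤ keys[(lo + hi) / 2] := not_lt.mp hcmp
        exact ih ((lo + hi) / 2 - lo) (by omega) lo ((lo + hi) / 2) rfl (by omega) (by omega)
          hlow
          (fun j hj hjge => by
            rcases Nat.lt_or_ge ((lo + hi) / 2) j with hj' | hj'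
            · exact le_trans hxle (List.pairwise_iff_getElem.mp hs ((lo + hi) / 2) j hmlen hj hj')
            · have : j = (lo + hi) / 2 := by omega
              exact this ▸ hxle)
    · simp only [h, if_false]
      have : lo = hi := by omega
      exact ⟨by omega, hlow, fun j hj hjge => hhigh j hj (this ▸ hjge)⟩

-- Source B's found(x) decides membership in a ≤-sorted key list.
theorem pvFound_iff (keys : List String) (x : String) (hs : keys.Pairwise (· ≤ ·)) :
    pvFound keys x = true ↔ x ∈ keys := by
  obtain ⟨hle, hlow, hhigh⟩ := pvBsearch_spec keys x hs (keys.length - 0) 0 keys.length rfl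
    (Nat.zero_le _) le_rfl (fun j hj hjlt => absurd hjlt (Nat.not_lt_zero j)) (fun j hj hge => absurd hj (by omega))
  unfold pvFound
  simp only [Bool.and_eq_true, decide_eq_true_eq, beq_iff_eq]
  constructor
  · rintro ⟨hlt, heq⟩
    rw [List.getD_eq_getElem keys "" hlt] at heq
    exact heq ▸ List.getElem_mem hlt
  · intro hmem
    obtain ⟨j, hj, hjx⟩ := List.mem_iff_getElem.mp hmem
    have hij : pvBsearch keys x 0 keys.length ≤ j := by
      by_contra hcon
      have hc := hlow j hj (not_le.mp hcon)
      rw [hjx] at hc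
      exact absurd hc (lt_irrefl x)
    have hlt : pvBsearch keys x 0 keys.length < keys.length := lt_of_le_of_lt hij hj
    refine ⟨hlt, ?_⟩
    rw [List.getD_eq_getElem keys "" hlt]
    have h1 : x ≤ keys[pvBsearch keys x 0 keys.length] := hhigh _ hlt le_rfl
    have h2 : keys[pvBsearch keys x 0 keys.length] ≤ x := by
      rcases Nat.lt_or_ge (pvBsearch keys x 0 keys.length) j with h' | h'
      · have hc := List.pairwise_iff_getElem.mp hs _ j hlt hj h'
        rw [hjx] at hc
        exact hc
      · have heqj : pvBsearch keys x 0 keys.length = j := by omega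
        exact le_of_eq (by simp only [heqj]; exact hjx)
    exact le_antisymm h2 h1

-- sorted(set(L)) is in particular ≤-sorted (stated for an abstract list L).
theorem pv_sorted_keys_le (L : List String) :
    (PySem.List.sorted (PySem.Set.ofList L) (fun s => s)).Pairwise (· ≤ ·) :=
  (PySem.List.sorted_ofList_pairwise_lt L).imp le_of_lt

-- A's dict membership and B's binary search answer the same question: is the
-- casefolded request among the casefolded mapping keys?
theorem pv_contains_eq_found (modality_refs : List (String × List String)) (y : String) :
    (modality_refs.foldl (fun d p => d.insert (PySem.Str.lower p.1) p.1)
        (PySem.Dict.empty : PySem.Dict String String)).contains y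
      = pvFound (PySem.List.sorted (PySem.Set.ofList (modality_refs.map (fun p => PySem.Str.lower p.1))) (fun s => s)) y := by
  have hs := pv_sorted_keys_le (modality_refs.map (fun p => PySem.Str.lower p.1))
  rw [PySem.Dict.contains_eq_decide_mem_keys,
      PySem.Dict.keys_foldl_insert_key modality_refs (fun p => PySem.Str.lower p.1) (fun _ p => p.1) PySem.Dict.empty,
      PySem.Dict.keys_empty, PySem.Set.update_nil_left]
  rw [Bool.eq_iff_iff, decide_eq_true_eq, pvFound_iff _ _ hs,
      PySem.List.mem_sorted, PySem.Set.mem_ofList]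

-- ===== VERDICT (by name: the statement is the Claim_ definition above) =====
theorem requested_modalities_with_refs_py_spec : Claim_equal_requested_modalities_with_refs_py := by
  intro rm refs _
  unfold Spec_requested_modalities_with_refs_py
  unfold requested_modalities_with_refs_py requested_modalities_with_refs_py_alt
  rw [PySem.List.foldl_append_if_eq_filter]
  simp only [List.nil_append]
  exact List.filter_congr (fun x _ => pv_contains_eq_found refs (PySem.Str.lower x))
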